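-- pv_equiv track=rewrite | github.com/realmarcin/cluewrite | scripts/rrwrite-extract-all-citations.py | deduplicate_citations
-- ===== SOURCE A (Python) =====
-- from typing import List, Dict, Set, Tuple
--
-- def deduplicate_citations(citations: List[Dict]) -> List[Dict]:
--     """Remove duplicates, prioritizing Paperpile > References > Plain text"""
--     seen_keys = {}
--     priority = {'paperpile': 1, 'reference_entry': 2, 'bracketed': 3, 'plain_text': 4}
--
--     for cit in citations:
--         # Generate key (handle None author/year)
--         author = (cit.get('author') or '').replace(' ', '').replace('and', '').lower()
--         year = cit.get('year') or ''
--         key = f"{author}_{year}"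
--
--         # Check if we've seen this citation
--         if key in seen_keys:
--             # Keep higher priority version
--             existing = seen_keys[key]
--             if priority.get(cit['type'], 99) < priority.get(existing['type'], 99):
--                 seen_keys[key] = cit
--         else:
--             seen_keys[key] = cit
--
--     return list(seen_keys.values())
-- ===== SOURCE B (Python) =====
-- from functools import reduce
-- from typing import List, Dict
--
-- def deduplicate_citations(citations: List[Dict]) -> List[Dict]:
--     """Remove duplicates, prioritizing Paperpile > References > Plain text.
--
--     Two-pass decomposition: group citations by key in first-seen order,
--     then fold each group to its highest-priority member."""
--     priority = {'paperpile': 1, 'reference_entry': 2, 'bracketed': 3, 'plain_text': 4}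
--     groups = {}
--     for cit in citations:
--         author = (cit.get('author') or '').replace(' ', '').replace('and', '').lower()
--         year = cit.get('year') or ''
--         groups.setdefault(f"{author}_{year}", []).append(cit)
--
--     def pick(acc, cit):
--         return cit if priority.get(cit['type'], 99) < priority.get(acc['type'], 99) else acc
--
--     return [reduce(pick, group) for group in groups.values()]
-- ===== Notes on version B (the rewrite author's own statement) =====
-- stated objective: alternative
-- what changed: A keeps a single running winner per key inside one dict-updating loop; B first groups the citations by key into an ordered dict of lists and then reduces each group with a priority-picking fold in a second pass.
import Mathlib
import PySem

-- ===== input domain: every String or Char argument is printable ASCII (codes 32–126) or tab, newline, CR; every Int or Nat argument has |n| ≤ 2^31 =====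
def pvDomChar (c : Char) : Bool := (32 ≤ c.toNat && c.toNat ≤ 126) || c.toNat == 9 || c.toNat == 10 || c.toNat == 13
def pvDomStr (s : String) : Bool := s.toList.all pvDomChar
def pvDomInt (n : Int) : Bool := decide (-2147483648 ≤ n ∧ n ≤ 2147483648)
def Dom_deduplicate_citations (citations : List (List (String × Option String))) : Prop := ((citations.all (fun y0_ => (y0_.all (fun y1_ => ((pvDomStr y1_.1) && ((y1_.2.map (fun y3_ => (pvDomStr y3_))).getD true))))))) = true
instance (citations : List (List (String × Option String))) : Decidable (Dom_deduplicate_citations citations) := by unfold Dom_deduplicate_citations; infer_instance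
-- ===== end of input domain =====

-- B regroups the work: pass 1 groups citations by author/year key into an ordered dict of
-- lists, pass 2 folds each group to its highest-priority member (alternative decomposition,
-- same cost). Pre_ excludes exactly the inputs where Python A raises KeyError ('type'
-- missing on a citation whose key clashes with another's).


-- shared helpers (used by both ports and by Pre_)
-- cit.get(k) or '' : missing key or stored None gives ''
def pvGetOr (c : List (String × Option String)) (k : String) : String :=
  match (PySem.Dict.mk c).get? k with
  | some (some s) => s
  | _ => ""

-- the dedup key f"{author}_{year}" as a list of chars
def pvKeyOf (c : List (String × Option String)) : List Char :=
  (PySem.Str.lower (PySem.Str.replace (PySem.Str.replace (pvGetOr c "author") " " "") "and" "")).toList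
    ++ '_' :: (pvGetOr c "year").toList

-- priority.get(v, 99) where v is the stored value of 'type'
def pvPrio (v : Option String) : Int :=
  match v with
  | some "paperpile" => 1
  | some "reference_entry" => 2
  | some "bracketed" => 3
  | some "plain_text" => 4
  | _ => 99

-- cit['type']; the KeyError case (none) is excluded by Pre_ and defaulted to None here
def pvType (c : List (String × Option String)) : Option String :=
  ((PySem.Dict.mk c).get? "type").getD none

-- ===== PORT A =====
def dedupStepA (seen : PySem.Dict (List Char) (List (String × Option String)))
    (c : List (String × Option String)) :
    PySem.Dict (List Char) (List (String × Option String)) :=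
  match seen.get? (pvKeyOf c) with
  | some existing =>
      if pvPrio (pvType c) < pvPrio (pvType existing) then seen.insert (pvKeyOf c) c else seen
  | none => seen.insert (pvKeyOf c) c

def deduplicate_citations (citations : List (List (String × Option String))) : List (List (String × Option String)) :=
  (citations.foldl dedupStepA PySem.Dict.empty).values

-- ===== PORT B =====
def dedupGroupStep (g : PySem.Dict (List Char) (List (List (String × Option String))))
    (c : List (String × Option String)) :
    PySem.Dict (List Char) (List (List (String × Option String))) :=
  g.insert (pvKeyOf c) (g.getD (pvKeyOf c) [] ++ [c])

def pvPick (acc c : List (String × Option String)) : List (String × Option String) :=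
  if pvPrio (pvType c) < pvPrio (pvType acc) then c else acc

def pvReduceGroup (g : List (List (String × Option String))) : List (String × Option String) :=
  match g with
  | [] => []
  | h :: t => t.foldl pvPick h

def deduplicate_citations_alt (citations : List (List (String × Option String))) : List (List (String × Option String)) :=
  ((citations.foldl dedupGroupStep PySem.Dict.empty).values).map pvReduceGroup

-- ===== PRECONDITION & SPEC =====
-- Pre_ excludes exactly the inputs on which Python A raises KeyError: a citation whose
-- key clashes with another citation's key but which has no 'type' entry.
def Pre_deduplicate_citations (citations : List (List (String × Option String))) : Prop :=
  ∀ c ∈ citations,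
    2 ≤ (citations.filter (fun c' => pvKeyOf c' == pvKeyOf c)).length →
    (PySem.Dict.mk c).contains "type" = true
instance (citations : List (List (String × Option String))) : Decidable (Pre_deduplicate_citations citations) := by unfold Pre_deduplicate_citations; infer_instance

def pvWitness_deduplicate_citations : (List (List (String × Option String))) :=
  [[("author", some "Smith"), ("year", some "1999"), ("type", some "plain_text")],
   [("author", some "smith"), ("year", some "1999"), ("type", some "paperpile")],
   [("author", some "Jones"), ("year", none)]]

def Spec_deduplicate_citations (citations : List (List (String × Option String))) (out : List (List (String × Option String))) : Prop := out = deduplicate_citations_alt citations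
instance (citations : List (List (String × Option String))) (out : List (List (String × Option String))) : Decidable (Spec_deduplicate_citations citations out) := by unfold Spec_deduplicate_citations; infer_instance

-- ===== CLAIM (what is proved, stated in full; the proofs are below) =====
def Claim_equal_deduplicate_citations : Prop := ∀ (citations : List (List (String × Option String))), Dom_deduplicate_citations citations → Pre_deduplicate_citations citations → Spec_deduplicate_citations citations (deduplicate_citations citations)

-- ===== LEMMAS AND PROOFS =====

-- map a function over the values of a dict, keeping keys and order
def pvMapv {κ ν ν' : Type} (f : ν → ν') (d : PySem.Dict κ ν) : PySem.Dict κ ν' :=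
  PySem.Dict.mk (d.items.map (fun p => (p.1, f p.2)))

theorem pv_get?_mapv {κ ν ν' : Type} [BEq κ] (f : ν → ν') (d : PySem.Dict κ ν) (k : κ) :
    (pvMapv f d).get? k = (d.get? k).map f := by
  obtain ⟨l⟩ := d
  induction l with
  | nil => rfl
  | cons p t ih =>
      simp only [pvMapv, PySem.Dict.get?, List.map_cons, List.find?] at *
      by_cases h : (p.1 == k) = true <;> simp [h] at ih ⊢ <;> try exact ih

theorem pv_contains_mapv {κ ν ν' : Type} [BEq κ] (f : ν → ν') (d : PySem.Dict κ ν) (k : κ) :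
    (pvMapv f d).contains k = d.contains k := by
  obtain ⟨l⟩ := d
  induction l with
  | nil => rfl
  | cons p t ih =>
      simp only [pvMapv, PySem.Dict.contains, List.map_cons, List.any_cons] at *
      by_cases h : (p.1 == k) = true <;> simp [h] at ih ⊢ <;> try exact ih

theorem pv_keys_mapv {κ ν ν' : Type} (f : ν → ν') (d : PySem.Dict κ ν) :
    (pvMapv f d).keys = d.keys := by
  simp [pvMapv, PySem.Dict.keys, List.map_map, Function.comp]

theorem pv_values_mapv {κ ν ν' : Type} (f : ν → ν') (d : PySem.Dict κ ν) :
    (pvMapv f d).values = d.values.map f := by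
  simp [pvMapv, PySem.Dict.values, List.map_map, Function.comp]

theorem pv_mapv_insert {κ ν ν' : Type} [BEq κ] (f : ν → ν') (d : PySem.Dict κ ν) (k : κ) (v : ν) :
    pvMapv f (d.insert k v) = (pvMapv f d).insert k (f v) := by
  simp only [PySem.Dict.insert, pv_contains_mapv]
  by_cases h : d.contains k = true
  · simp only [h, if_true, pvMapv, List.map_map]
    congr 1
    apply List.map_congr_left
    intro p _
    by_cases hp : (p.1 == k) = true <;> simp [hp, Function.comp]
  · simp [h, pvMapv]

theorem pv_contains_of_get?_eq_some {κ ν : Type} [BEq κ] (d : PySem.Dict κ ν) (k : κ) (v : ν)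
    (h : d.get? k = some v) : d.contains k = true := by
  rw [PySem.Dict.contains_eq_isSome_get?, h]; rfl

theorem pv_insert_self_of_get? {κ ν : Type} [BEq κ] [LawfulBEq κ] (d : PySem.Dict κ ν) (k : κ) (v : ν)
    (hnd : d.keys.Nodup) (h : d.get? k = some v) : d.insert k v = d := by
  obtain ⟨l⟩ := d
  induction l with
  | nil => simp [PySem.Dict.get?] at h
  | cons p t ih =>
      simp only [PySem.Dict.keys, List.map_cons, List.nodup_cons] at hnd
      have hc := pv_contains_of_get?_eq_some _ _ _ h
      simp only [PySem.Dict.insert, hc, if_true, List.map_cons, PySem.Dict.mk.injEq, List.cons.injEq]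
      by_cases hp : (p.1 == k) = true
      · have hpk : p.1 = k := eq_of_beq hp
        have hv : p.2 = v := by
          simp only [PySem.Dict.get?, List.find?, hp, Option.map_some, Option.some.injEq] at h
          exact h
        constructor
        · simp [← hpk, ← hv]
        · have : ∀ q ∈ t, (if (q.1 == k) = true then (k, v) else q) = q := by
            intro q hq
            have : ¬ (q.1 == k) = true := by
              intro hqk
              exact hnd.1 (by rw [← hpk] at hqk; rw [← eq_of_beq hqk]; exact List.mem_map_of_mem hq)
            simp [this]
          simp only [List.map_congr_left this, List.map_id']
      · have ht : (PySem.Dict.mk t).get? k = some v := by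
          simp only [PySem.Dict.get?, List.find?, hp] at h ⊢
          exact h
        have hct := pv_contains_of_get?_eq_some _ _ _ ht
        have := ih hnd.2 ht
        simp only [PySem.Dict.insert, hct, if_true, PySem.Dict.mk.injEq] at this
        constructor
        · simp [hp]
        · exact this

theorem pv_mem_values_of_get? {κ ν : Type} [BEq κ] (d : PySem.Dict κ ν) (k : κ) (v : ν)
    (h : d.get? k = some v) : v ∈ d.values := by
  obtain ⟨q, hq, hqv⟩ := Option.map_eq_some_iff.mp h
  exact hqv ▸ List.mem_map_of_mem (List.mem_of_find?_eq_some hq)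

theorem pv_reduce_append (g : List (List (String × Option String))) (c : List (String × Option String))
    (hg : g ≠ []) : pvReduceGroup (g ++ [c]) = pvPick (pvReduceGroup g) c := by
  match g with
  | [] => exact absurd rfl hg
  | h :: t => simp [pvReduceGroup, List.foldl_append]

theorem pv_main (cs : List (List (String × Option String))) :
    ∀ gd : PySem.Dict (List Char) (List (List (String × Option String))),
      gd.keys.Nodup → (∀ g ∈ gd.values, g ≠ []) →
      cs.foldl dedupStepA (pvMapv pvReduceGroup gd) = pvMapv pvReduceGroup (cs.foldl dedupGroupStep gd) := by
  induction cs with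
  | nil => intro gd _ _; rfl
  | cons c cs ih =>
      intro gd hnd hne
      have hstep : dedupStepA (pvMapv pvReduceGroup gd) c = pvMapv pvReduceGroup (dedupGroupStep gd c) := by
        unfold dedupStepA dedupGroupStep
        rw [pv_get?_mapv]
        cases hg : gd.get? (pvKeyOf c) with
        | none =>
            simp only [PySem.Dict.getD_eq_get?_getD, hg, Option.getD_none, Option.map_none,
              List.nil_append, pv_mapv_insert]
            rfl
        | some g =>
            have hgne : g ≠ [] := hne g (pv_mem_values_of_get? _ _ _ hg)
            rw [PySem.Dict.getD_eq_get?_getD, hg]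
            simp only [Option.getD_some]
            simp only [Option.map_some]
            rw [pv_mapv_insert, pv_reduce_append g c hgne]
            unfold pvPick
            split
            · rfl
            · exact (pv_insert_self_of_get? _ _ _
                (by rw [pv_keys_mapv]; exact hnd)
                (by rw [pv_get?_mapv, hg]; rfl)).symm
      rw [List.foldl_cons, List.foldl_cons, hstep]
      exact ih (dedupGroupStep gd c)
        (PySem.Dict.nodup_keys_insert _ _ _ hnd)
        (by
          intro g hgmem
          rcases PySem.Dict.mem_values_insert _ _ _ _ (by unfold dedupGroupStep at hgmem; exact hgmem) with h | h
          · cases h; simp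
          · exact hne g h)

-- ===== VERDICT (by name: the statement is the Claim_ definition above) =====
theorem deduplicate_citations_spec : Claim_equal_deduplicate_citations := by
  intro cs _ _
  unfold Spec_deduplicate_citations deduplicate_citations deduplicate_citations_alt
  have h := pv_main cs PySem.Dict.empty (by simp [PySem.Dict.empty, PySem.Dict.keys]) (by simp [PySem.Dict.empty, PySem.Dict.values])
  have he : pvMapv pvReduceGroup
      (PySem.Dict.empty : PySem.Dict (List Char) (List (List (String × Option String)))) =
      (PySem.Dict.empty : PySem.Dict (List Char) (List (String × Option String))) := rfl
  rw [he] at h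
  rw [h, pv_values_mapv]
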